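-- pv_equiv track=rewrite | github.com/krduffy/korean-dictionary | api/tests.py | forms_path
-- ===== SOURCE A (Python) =====
-- def forms_path(origins):
--
--   for i in range(0, len(origins) - 1):
--     found_same = False
--
--     for char in origins[i]:
--       if char in origins[i + 1]:
--         found_same = True
--
--     if not found_same:
--       return False
--
--   return True
-- ===== SOURCE B (Python) =====
-- def forms_path(origins):
--   for a, b in zip(origins, origins[1:]):
--     if len(set(a + b)) == len(set(a)) + len(set(b)):
--       return False
--   return True
-- ===== Notes on version B (the rewrite author's own statement) =====
-- stated objective: alternative
-- what changed: Instead of scanning each character of one string for membership in the next with a found_same flag, B zips consecutive pairs and decides overlap by inclusion-exclusion on distinct-character counts: the pair shares a character iff len(set(a+b)) < len(set(a))+len(set(b)); no membership test or flag remains.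
import Mathlib
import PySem

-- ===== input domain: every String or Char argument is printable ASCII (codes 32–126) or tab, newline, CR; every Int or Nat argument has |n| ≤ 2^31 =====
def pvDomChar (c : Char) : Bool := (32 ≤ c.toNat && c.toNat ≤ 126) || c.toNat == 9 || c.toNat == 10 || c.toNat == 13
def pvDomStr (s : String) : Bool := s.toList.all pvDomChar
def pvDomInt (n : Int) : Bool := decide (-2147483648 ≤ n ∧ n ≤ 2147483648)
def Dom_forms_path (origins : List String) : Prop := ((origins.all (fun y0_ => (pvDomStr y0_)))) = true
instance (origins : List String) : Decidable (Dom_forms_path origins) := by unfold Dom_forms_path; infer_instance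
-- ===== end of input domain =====

-- B decides overlap of consecutive pairs by inclusion-exclusion on distinct-character
-- counts (len(set(a+b)) vs len(set(a))+len(set(b))) over zip(origins, origins[1:]),
-- removing A's membership scan and found_same flag (objective: alternative).

-- ===== PORT A =====
-- inner loop: for char in origins[i]: if char in origins[i+1]: found_same = True
def pvInnerA (s t : List Char) : Bool :=
  s.foldl (fun acc c => if t.contains c then true else acc) false

-- outer loop with early return, over the indices of range(0, len-1)
def pvGoA (origins : List String) : List Nat → Bool
  | [] => true
  | i :: rest =>
    let found_same := pvInnerA (origins.getD i "").toList (origins.getD (i + 1) "").toList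
    if !found_same then false else pvGoA origins rest

def forms_path (origins : List String) : Bool :=
  pvGoA origins (List.range (origins.length - 1))

-- ===== PORT B =====
-- for a, b in zip(origins, origins[1:]): if len(set(a+b)) == len(set(a)) + len(set(b)): return False
def pvGoB : List (String × String) → Bool
  | [] => true
  | (a, b) :: rest =>
    if (PySem.Set.ofList (a.toList ++ b.toList)).length
        = (PySem.Set.ofList a.toList).length + (PySem.Set.ofList b.toList).length
    then false else pvGoB rest

def forms_path_alt (origins : List String) : Bool :=
  pvGoB (origins.zip (origins.drop 1))

-- ===== PRECONDITION & SPEC =====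
def Spec_forms_path (origins : List String) (out : Bool) : Prop := out = forms_path_alt origins
instance (origins : List String) (out : Bool) : Decidable (Spec_forms_path origins out) := by unfold Spec_forms_path; infer_instance

-- ===== CLAIM (what is proved, stated in full; the proofs are below) =====
def Claim_equal_forms_path : Prop := ∀ (origins : List String), Dom_forms_path origins → Spec_forms_path origins (forms_path origins)

-- ===== LEMMAS AND PROOFS =====

theorem pv_foldl_flag (t : List Char) (s : List Char) (acc : Bool) :
    s.foldl (fun acc c => if t.contains c then true else acc) acc
      = (acc || s.any (fun c => t.contains c)) := by
  induction s generalizing acc with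
  | nil => simp
  | cons c s ih =>
    simp only [List.foldl_cons, List.any_cons, ih]
    by_cases h : c ∈ t <;> simp [h]

theorem pv_toFinset_ofList (s : List Char) :
    (PySem.Set.ofList s).toFinset = s.toFinset := by
  ext x; simp [List.mem_toFinset, PySem.Set.mem_ofList]

theorem pv_len_ofList (s : List Char) :
    (PySem.Set.ofList s).length = s.toFinset.card := by
  rw [← pv_toFinset_ofList, List.toFinset_card_of_nodup (PySem.Set.nodup_ofList s)]

-- inclusion-exclusion: distinct count of the concatenation equals the sum iff no common char
theorem pv_count_iff (s t : List Char) :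
    ((PySem.Set.ofList (s ++ t)).length
        = (PySem.Set.ofList s).length + (PySem.Set.ofList t).length)
      ↔ Disjoint s.toFinset t.toFinset := by
  simp only [pv_len_ofList, List.toFinset_append]
  constructor
  · intro h
    have := Finset.card_union_add_card_inter s.toFinset t.toFinset
    have hinter : (s.toFinset ∩ t.toFinset).card = 0 := by omega
    rw [Finset.card_eq_zero] at hinter
    exact Finset.disjoint_iff_inter_eq_empty.mpr hinter
  · intro h
    exact Finset.card_union_of_disjoint h

theorem pv_inner_iff (s t : List Char) :
    pvInnerA s t = false ↔ Disjoint s.toFinset t.toFinset := by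
  unfold pvInnerA
  rw [pv_foldl_flag]
  simp [List.disjoint_toFinset_iff_disjoint, List.disjoint_left, List.any_eq_false]

-- the pairwise check of B at one pair agrees with A's inner scan
theorem pv_pair_eq (a b : String) :
    pvInnerA a.toList b.toList
      = !((PySem.Set.ofList (a.toList ++ b.toList)).length
            = (PySem.Set.ofList a.toList).length + (PySem.Set.ofList b.toList).length : Bool) := by
  rcases h : pvInnerA a.toList b.toList with _ | _
  · rw [pv_inner_iff] at h
    simp [decide_eq_true ((pv_count_iff a.toList b.toList).mpr h)]
  · have hne : ¬ Disjoint a.toList.toFinset b.toList.toFinset := by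
      intro hd
      rw [← pv_inner_iff] at hd
      simp [h] at hd
    have : ¬ ((PySem.Set.ofList (a.toList ++ b.toList)).length
        = (PySem.Set.ofList a.toList).length + (PySem.Set.ofList b.toList).length) := by
      intro hc; exact hne ((pv_count_iff a.toList b.toList).mp hc)
    simp [this]

-- the zipped pair list IS the list of (origins[i], origins[i+1]) over range(len-1)
theorem pv_zip_eq_range_map (origins : List String) :
    origins.zip (origins.drop 1)
      = (List.range (origins.length - 1)).map
          (fun i => (origins.getD i "", origins.getD (i + 1) "")) := by
  apply List.ext_getElem
  · simp [List.length_zip]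
  · intro i h1 h2
    have hi : i < origins.length - 1 := by simpa using h2
    have hi1 : i < origins.length := by omega
    have hi2 : i + 1 < origins.length := by omega
    simp [List.getElem_zip, List.getD_eq_getElem?_getD, hi1, hi2]

theorem pv_goB_map (origins : List String) (l : List Nat) :
    pvGoB (l.map (fun i => (origins.getD i "", origins.getD (i + 1) "")))
      = pvGoA origins l := by
  induction l with
  | nil => rfl
  | cons i rest ih =>
    simp only [List.map_cons, pvGoB, pvGoA, ih, pv_pair_eq]
    rcases pvInnerA (origins.getD i "").toList (origins.getD (i + 1) "").toList <;> simp

-- ===== VERDICT (by name: the statement is the Claim_ definition above) =====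
theorem forms_path_spec : Claim_equal_forms_path := by
  intro origins _
  unfold Spec_forms_path forms_path forms_path_alt
  rw [pv_zip_eq_range_map, pv_goB_map]
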